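-- pv_equiv track=rewrite | github.com/jonojace/fairseq | examples/speech_audio_corrector/generate_waveform_sac.py | dedupe_adjacent
-- ===== SOURCE A (Python) =====
-- def dedupe_adjacent(iterable, token_to_dedupe="<mask>"):
--     prev = object()
--     for item in iterable:
--         if item != token_to_dedupe:
--             prev = item
--             yield item
--         elif item != prev: # here item is equal to token_to_dedupe
--             prev = item
--             yield item
-- ===== SOURCE B (Python) =====
-- def dedupe_adjacent(iterable, token_to_dedupe="<mask>"):
--     # Group-first traversal: scan each run of equal items once;
--     # emit a token run as a single token, any other run unchanged.
--     items = list(iterable)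
--     n = len(items)
--     i = 0
--     while i < n:
--         j = i
--         while j < n and items[j] == items[i]:
--             j += 1
--         if items[i] == token_to_dedupe:
--             yield items[i]
--         else:
--             yield from items[i:j]
--         i = j
-- ===== Notes on version B (the rewrite author's own statement) =====
-- stated objective: alternative
-- what changed: Replaces A's per-element branch with a remembered prev sentinel by a run-based traversal: B scans each maximal run of equal items once and emits a token run as a single token and any other run verbatim.
import Mathlib
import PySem

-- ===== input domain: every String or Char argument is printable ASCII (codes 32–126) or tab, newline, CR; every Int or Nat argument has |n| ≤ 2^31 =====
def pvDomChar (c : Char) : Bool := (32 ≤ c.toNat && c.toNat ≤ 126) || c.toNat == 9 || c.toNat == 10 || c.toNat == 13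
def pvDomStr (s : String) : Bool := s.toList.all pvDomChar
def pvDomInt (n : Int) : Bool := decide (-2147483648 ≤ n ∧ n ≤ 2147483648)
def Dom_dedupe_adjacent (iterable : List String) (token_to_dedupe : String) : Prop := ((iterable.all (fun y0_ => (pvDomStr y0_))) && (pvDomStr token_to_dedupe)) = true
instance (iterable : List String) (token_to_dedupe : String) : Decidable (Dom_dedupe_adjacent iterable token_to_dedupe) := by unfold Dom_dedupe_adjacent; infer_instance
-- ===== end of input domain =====

-- B replaces A's per-element loop (sentinel prev) by a run-based traversal: each maximal run of
-- equal items is scanned once; a token run is emitted as a single token, other runs verbatim.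


-- ===== PORT A =====
-- prev starts as 'object()', a sentinel unequal to every string: modelled by 'none'.
def dedupeGoA (tok : String) (prev : Option String) : List String → List String
  | [] => []
  | x :: xs =>
    if x ≠ tok then x :: dedupeGoA tok (some x) xs
    else if some x ≠ prev then x :: dedupeGoA tok (some x) xs
    else dedupeGoA tok prev xs

def dedupe_adjacent (iterable : List String) (token_to_dedupe : String) : List String :=
  dedupeGoA token_to_dedupe none iterable

-- ===== PORT B =====
-- the inner 'while j < n and items[j] == items[i]' scan is takeWhile/dropWhile of the run of x
def dedupeGoB (tok : String) : List String → List String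
  | [] => []
  | x :: xs =>
    (if x = tok then [x] else x :: xs.takeWhile (· == x)) ++ dedupeGoB tok (xs.dropWhile (· == x))
termination_by l => l.length
decreasing_by
  simpa using Nat.lt_succ_of_le (List.length_dropWhile_le (· == x) xs)

def dedupe_adjacent_alt (iterable : List String) (token_to_dedupe : String) : List String :=
  dedupeGoB token_to_dedupe iterable

-- ===== PRECONDITION & SPEC =====
def Spec_dedupe_adjacent (iterable : List String) (token_to_dedupe : String) (out : List String) : Prop := out = dedupe_adjacent_alt iterable token_to_dedupe
instance (iterable : List String) (token_to_dedupe : String) (out : List String) : Decidable (Spec_dedupe_adjacent iterable token_to_dedupe out) := by unfold Spec_dedupe_adjacent; infer_instance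

-- ===== CLAIM (what is proved, stated in full; the proofs are below) =====
def Claim_equal_dedupe_adjacent : Prop := ∀ (iterable : List String) (token_to_dedupe : String), Dom_dedupe_adjacent iterable token_to_dedupe → Spec_dedupe_adjacent iterable token_to_dedupe (dedupe_adjacent iterable token_to_dedupe)

-- ===== LEMMAS AND PROOFS =====

-- at a head ≠ tok the A-loop ignores prev
theorem dedupeGoA_head_ne (tok y : String) (p : Option String) (ys : List String)
    (h : y ≠ tok) : dedupeGoA tok p (y :: ys) = y :: dedupeGoA tok (some y) ys := by
  simp [dedupeGoA, h]

-- the A-loop's behaviour depends on prev only through 'prev = some tok'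
theorem dedupeGoA_indep (tok : String) (p q : Option String) (l : List String)
    (hp : p ≠ some tok) (hq : q ≠ some tok) : dedupeGoA tok p l = dedupeGoA tok q l := by
  cases l with
  | nil => rfl
  | cons x xs =>
    by_cases hx : x = tok
    · subst hx
      simp [dedupeGoA, Ne.symm hp, Ne.symm hq]
    · simp [dedupeGoA, hx]

-- with prev = tok, the A-loop skips a leading run of tokens
theorem dedupeGoA_skip (tok : String) (xs : List String) :
    dedupeGoA tok (some tok) xs = dedupeGoA tok (some tok) (xs.dropWhile (· == tok)) := by
  induction xs with
  | nil => rfl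
  | cons x xs ih =>
    by_cases hx : x = tok
    · subst hx
      simpa [dedupeGoA, List.dropWhile_cons_of_pos] using ih
    · simp [List.dropWhile_cons_of_neg, hx]

-- with prev = x ≠ tok, the A-loop copies a run of x's verbatim
theorem dedupeGoA_run (tok x : String) (hx : x ≠ tok) :
    ∀ (l rest : List String), (∀ a ∈ l, a = x) →
    dedupeGoA tok (some x) (l ++ rest) = l ++ dedupeGoA tok (some x) rest := by
  intro l
  induction l with
  | nil => intro rest _; rfl
  | cons a l ih =>
    intro rest hall
    have ha : a = x := hall a (by simp)
    subst ha
    simp only [List.cons_append, dedupeGoA_head_ne tok a _ _ hx]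
    exact congrArg (a :: ·) (ih rest (fun b hb => hall b (by simp [hb])))

theorem dedupeGo_main (tok : String) :
    ∀ (n : Nat) (l : List String) (p : Option String), l.length ≤ n → p ≠ some tok →
    dedupeGoA tok p l = dedupeGoB tok l := by
  intro n
  induction n with
  | zero =>
    intro l p hl _
    have : l = [] := List.eq_nil_of_length_eq_zero (Nat.le_zero.mp hl)
    subst this; simp [dedupeGoA, dedupeGoB]
  | succ n ih =>
    intro l p hl hp
    cases l with
    | nil => simp [dedupeGoA, dedupeGoB]
    | cons x xs =>
      have hrest : (xs.dropWhile (· == x)).length ≤ n := by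
        have := List.length_dropWhile_le (· == x) xs
        simp at hl; omega
      by_cases hx : x = tok
      · have h1 : dedupeGoA tok p (x :: xs) = x :: dedupeGoA tok (some x) xs := by
          simp [dedupeGoA, hx, Ne.symm hp]
        rw [h1, hx, dedupeGoA_skip]
        have hrest' : (xs.dropWhile (· == tok)).length ≤ n := by
          have := List.length_dropWhile_le (· == tok) xs
          simp at hl; omega
        have h2 : dedupeGoA tok (some tok) (xs.dropWhile (· == tok)) =
            dedupeGoB tok (xs.dropWhile (· == tok)) := by
          cases hr : xs.dropWhile (· == tok) with
          | nil => simp [dedupeGoA, dedupeGoB]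
          | cons y ys =>
            have hy : ¬ (y == tok) = true := by
              have := List.head?_dropWhile_not (· == tok) xs
              rw [hr] at this; simpa using this
            have hy' : y ≠ tok := by simpa using hy
            rw [dedupeGoA_head_ne tok y _ _ hy', ← dedupeGoA_head_ne tok y none _ hy']
            exact ih (y :: ys) none (by rw [← hr]; exact hrest') (by simp)
        rw [h2]; simp [dedupeGoB]
      · have h1 : dedupeGoA tok p (x :: xs) = x :: dedupeGoA tok (some x) xs :=
          dedupeGoA_head_ne tok x p xs hx
        have hsplit : xs = xs.takeWhile (· == x) ++ xs.dropWhile (· == x) :=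
          (List.takeWhile_append_dropWhile (p := (· == x)) (l := xs)).symm
        have hall : ∀ a ∈ xs.takeWhile (· == x), a = x := by
          intro a ha
          simpa using List.mem_takeWhile_imp ha
        rw [h1]
        conv_lhs => rw [hsplit]
        rw [dedupeGoA_run tok x hx _ _ hall]
        rw [dedupeGoA_indep tok (some x) none _ (by simp [hx]) (by simp)]
        rw [ih (xs.dropWhile (· == x)) none hrest (by simp)]
        simp [dedupeGoB, hx]

-- ===== VERDICT (by name: the statement is the Claim_ definition above) =====
theorem dedupe_adjacent_spec : Claim_equal_dedupe_adjacent := by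
  intro iterable tok _
  unfold Spec_dedupe_adjacent dedupe_adjacent dedupe_adjacent_alt
  exact dedupeGo_main tok iterable.length iterable none (Nat.le_refl _) (by simp)
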